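-- pv_equiv track=rewrite | github.com/eliottcassidy2000/math | 03-artifacts/code/tournament_fast.py | c4_fast
-- ===== SOURCE A (Python) =====
-- def c4_fast(T):
--     """Count directed 4-cycles using trace formula. O(n^3).
--
--     By THM-096: tr(A^k) = k * c_k for k = 3, 4, 5 in tournaments.
--     Therefore: c_4 = tr(A^4) / 4.
--     """
--     n = len(T)
--     if n < 4:
--         return 0
--
--     # A^2
--     A2 = [[sum(T[i][k] * T[k][j] for k in range(n))
--            for j in range(n)] for i in range(n)]
--     # A^4 = A^2 * A^2
--     A4 = [[sum(A2[i][k] * A2[k][j] for k in range(n))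
--            for j in range(n)] for i in range(n)]
--     tr4 = sum(A4[i][i] for i in range(n))
--     return tr4 // 4
-- ===== SOURCE B (Python) =====
-- def c4_fast(T):
--     """Count directed 4-cycles via trace formula: c_4 = tr(A^4) // 4.
--
--     Computes A^2 once, then tr(A^4) = sum_{i,j} A2[i][j]*A2[j][i] as a
--     scalar double sum, never materializing A^4.
--     """
--     n = len(T)
--     if n < 4:
--         return 0
--     A2 = [[sum(T[i][k] * T[k][j] for k in range(n))
--            for j in range(n)] for i in range(n)]
--     tr4 = sum(A2[i][j] * A2[j][i] for i in range(n) for j in range(n))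
--     return tr4 // 4
-- ===== Notes on version B (the rewrite author's own statement) =====
-- stated objective: faster
-- what changed: B keeps the A^2 computation but replaces the second full matrix product plus diagonal extraction by a direct scalar double sum tr(A^4) = sum_{i,j} A2[i][j]*A2[j][i], maintaining a scalar instead of an n x n matrix.
import Mathlib
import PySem

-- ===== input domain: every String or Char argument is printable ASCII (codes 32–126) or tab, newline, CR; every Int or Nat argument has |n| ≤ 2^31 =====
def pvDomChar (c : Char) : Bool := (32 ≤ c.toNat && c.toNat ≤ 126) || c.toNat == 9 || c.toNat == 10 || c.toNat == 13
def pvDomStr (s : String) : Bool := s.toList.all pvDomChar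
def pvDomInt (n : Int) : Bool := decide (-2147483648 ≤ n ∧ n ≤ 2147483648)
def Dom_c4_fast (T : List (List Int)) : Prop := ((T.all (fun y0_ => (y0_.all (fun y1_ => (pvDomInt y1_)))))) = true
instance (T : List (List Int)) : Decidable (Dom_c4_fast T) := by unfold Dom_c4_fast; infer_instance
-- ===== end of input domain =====

-- B changes only the second pass: tr(A^4) is computed as a scalar double sum over A^2
-- instead of materializing A^4 and summing its diagonal (objective: faster second pass).

-- entry M[i][j]; exact on Pre_ (indices in range there), default 0 stands for the IndexError case excluded by Pre_
def pvEntry (M : List (List Int)) (i j : Nat) : Int := (M.getD i []).getD j 0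

-- A^2 as both Pythons compute it (identical comprehension in A and B)
def pvA2 (T : List (List Int)) (n : Nat) : List (List Int) :=
  (List.range n).map (fun i => (List.range n).map (fun j =>
    ((List.range n).map (fun k => pvEntry T i k * pvEntry T k j)).sum))

-- ===== PORT A =====
def c4_fast (T : List (List Int)) : Int :=
  let n := T.length
  if n < 4 then 0 else
  let A2 := pvA2 T n
  let A4 := (List.range n).map (fun i => (List.range n).map (fun j =>
    ((List.range n).map (fun k => pvEntry A2 i k * pvEntry A2 k j)).sum))
  let tr4 := ((List.range n).map (fun i => pvEntry A4 i i)).sum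
  PySem.Int.floordiv tr4 4

-- ===== PORT B =====
def c4_fast_alt (T : List (List Int)) : Int :=
  let n := T.length
  if n < 4 then 0 else
  let A2 := pvA2 T n
  let tr4 := ((List.range n).map (fun i =>
    ((List.range n).map (fun j => pvEntry A2 i j * pvEntry A2 j i)).sum)).sum
  PySem.Int.floordiv tr4 4

-- ===== PRECONDITION & SPEC =====
-- Pre_ excludes exactly the ragged inputs (some row shorter than len(T), with len(T) ≥ 4)
-- on which the Python A raises IndexError; B raises there too.
def Pre_c4_fast (T : List (List Int)) : Prop :=
  T.length < 4 ∨ ∀ r ∈ T, T.length ≤ r.length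
instance (T : List (List Int)) : Decidable (Pre_c4_fast T) := by unfold Pre_c4_fast; infer_instance
def pvWitness_c4_fast : List (List Int) :=
  [[0,1,1,1],[0,0,1,1],[0,0,0,1],[0,0,0,0]]
def Spec_c4_fast (T : List (List Int)) (out : Int) : Prop := out = c4_fast_alt T
instance (T : List (List Int)) (out : Int) : Decidable (Spec_c4_fast T out) := by unfold Spec_c4_fast; infer_instance

-- ===== CLAIM (what is proved, stated in full; the proofs are below) =====
def Claim_equal_c4_fast : Prop := ∀ (T : List (List Int)), Dom_c4_fast T → Pre_c4_fast T → Spec_c4_fast T (c4_fast T)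

-- ===== LEMMAS AND PROOFS =====

theorem pv_getD_map_range {α : Type} (n i : Nat) (h : i < n) (f : Nat → α) (d : α) :
    (((List.range n).map f).getD i d) = f i := by
  have hl : i < ((List.range n).map f).length := by simpa using h
  rw [List.getD_eq_getElem _ _ hl]
  simp

-- the two trace expressions coincide: Σ_i (A2·A2)[i][i] = Σ_i Σ_j A2[i][j]·A2[j][i]
theorem pv_tr_eq (A2 : List (List Int)) (n : Nat) :
    ((List.range n).map (fun i =>
        pvEntry ((List.range n).map (fun i => (List.range n).map (fun j =>
          ((List.range n).map (fun k => pvEntry A2 i k * pvEntry A2 k j)).sum))) i i)).sum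
  = ((List.range n).map (fun i =>
        ((List.range n).map (fun j => pvEntry A2 i j * pvEntry A2 j i)).sum)).sum := by
  apply congrArg
  apply List.map_congr_left
  intro i hi
  have hin : i < n := List.mem_range.mp hi
  unfold pvEntry
  rw [pv_getD_map_range n i hin, pv_getD_map_range n i hin]

-- ===== VERDICT (by name: the statement is the Claim_ definition above) =====
theorem c4_fast_spec : Claim_equal_c4_fast := by
  intro T _ _
  show c4_fast T = c4_fast_alt T
  simp only [c4_fast, c4_fast_alt]
  by_cases h : T.length < 4
  · rw [if_pos h, if_pos h]
  · rw [if_neg h, if_neg h]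
    exact congrArg (fun t => PySem.Int.floordiv t 4) (pv_tr_eq (pvA2 T T.length) T.length)
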